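-- pv_equiv track=rewrite | github.com/eabadir/EGPT | content/pyFRAQTL/pyFRAQTLsdk.py | reconstruct_order_candidates
-- ===== SOURCE A (Python) =====
-- from typing import Optional, Tuple, List, Dict, Union
--
-- def continued_fraction(num: int, den: int) -> List[int]:
--     cf = []
--     while den:
--         a = num // den
--         cf.append(a)
--         num, den = den, num - a * den
--     return cf
--
-- def convergents(cf: List[int]) -> List[Tuple[int,int]]:
--     if not cf:
--         return []
--     conv: List[Tuple[int,int]] = []
--     p0, p1 = 1, cf[0]
--     q0, q1 = 0, 1
--     conv.append((p1, q1))
--     for a in cf[1:]: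
--         p2 = a * p1 + p0
--         q2 = a * q1 + q0
--         conv.append((p2, q2))
--         p0, p1 = p1, p2
--         q0, q1 = q1, q2
--     return conv
--
-- def best_rational_approx(phase_num: int, phase_den: int, max_den: int) -> Optional[Tuple[int,int]]:
--     cf = continued_fraction(phase_num, phase_den)
--     best: Optional[Tuple[int,int]] = None
--     for p, q in convergents(cf):
--         if q <= max_den:
--             best = (p, q)
--         else:
--             break
--     return best
--
-- def reconstruct_order_candidates(samples: List[Tuple[int,int]], a: int, N: int, max_den: Optional[int] = None) -> List[int]:
--     if not samples:
--         return []
--     if max_den is None: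
--         max_den = N
--     cands = []
--     for s, den in samples:
--         s = int(s); den = int(den)
--         approx = best_rational_approx(s, den, max_den)
--         if approx is None:
--             continue
--         p, q = approx
--         if q > 1:
--             cands.append(q)
--     uniq: List[int] = []
--     for r in sorted(set(cands)):
--         uniq.append(r)
--     return uniq
-- ===== SOURCE B (Python) =====
-- def reconstruct_order_candidates(samples, a, N, max_den=None):
--     if max_den is None:
--         max_den = N
--     qs = set()
--     for num, den in samples:
--         num = int(num); den = int(den)
--         q0, q1 = 1, 0
--         best_q = None
--         while den:
--             t = num // den
--             q0, q1 = q1, t * q1 + q0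
--             if max_den < q1:
--                 break
--             best_q = q1
--             num, den = den, num - t * den
--         if best_q is not None and best_q > 1:
--             qs.add(best_q)
--     return sorted(qs)
-- ===== Notes on version B (the rewrite author's own statement) =====
-- stated objective: alternative
-- what changed: The continued_fraction -> convergents -> scan-with-break pipeline is fused into a single per-sample Euclidean loop that tracks only the running convergent denominator (no quotient or convergent list is materialised) and adds accepted denominators to a set on the fly instead of collecting a list and deduplicating afterwards.
import Mathlib
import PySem

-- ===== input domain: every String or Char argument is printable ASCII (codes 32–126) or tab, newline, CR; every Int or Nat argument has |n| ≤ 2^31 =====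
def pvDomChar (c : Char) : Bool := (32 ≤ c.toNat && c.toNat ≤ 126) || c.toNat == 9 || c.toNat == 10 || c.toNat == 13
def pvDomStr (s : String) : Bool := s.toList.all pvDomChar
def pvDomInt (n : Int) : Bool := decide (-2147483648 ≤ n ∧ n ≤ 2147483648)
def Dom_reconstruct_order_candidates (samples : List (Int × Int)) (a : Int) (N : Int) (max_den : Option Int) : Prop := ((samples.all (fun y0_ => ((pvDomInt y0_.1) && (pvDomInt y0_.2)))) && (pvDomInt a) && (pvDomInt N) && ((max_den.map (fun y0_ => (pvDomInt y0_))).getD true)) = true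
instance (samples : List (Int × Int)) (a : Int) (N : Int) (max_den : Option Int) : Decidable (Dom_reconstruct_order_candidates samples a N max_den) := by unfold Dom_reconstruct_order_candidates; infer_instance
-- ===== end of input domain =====

-- B replaces A's continued_fraction -> convergents -> scan pipeline by one fused Euclidean loop
-- per sample that tracks only the running convergent denominator and adds it to a set on the fly
-- (objective: alternative decomposition, no list of quotients/convergents is ever materialised).


-- termination helper shared by both ports' Euclidean recursions
theorem pvModAbsLt (num den : Int) (h : den ≠ 0) :
    (num - PySem.Int.floordiv num den * den).natAbs < den.natAbs := by
  have hm : num - PySem.Int.floordiv num den * den = PySem.Int.mod num den := by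
    have := PySem.Int.floordiv_mul_add_mod num den
    omega
  rcases lt_or_gt_of_ne h with hneg | hpos
  · have := PySem.Int.mod_neg_bounds num hneg
    omega
  · have h1 := PySem.Int.mod_nonneg num hpos
    have h2 := PySem.Int.mod_lt num hpos
    omega

-- ===== PORT A =====
-- continued_fraction(num, den)
def pyCF (num den : Int) : List Int :=
  if h : den = 0 then []
  else
    let q := PySem.Int.floordiv num den
    q :: pyCF den (num - q * den)
termination_by den.natAbs
decreasing_by exact pvModAbsLt num den h

-- the for-loop body of convergents (state = (conv, p0, p1, q0, q1))
def pyConvStep (st : List (Int × Int) × Int × Int × Int × Int) (a : Int) :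
    List (Int × Int) × Int × Int × Int × Int :=
  match st with
  | (conv, p0, p1, q0, q1) =>
    let p2 := a * p1 + p0
    let q2 := a * q1 + q0
    (conv ++ [(p2, q2)], p1, p2, q1, q2)

-- convergents(cf)
def pyConvergents (cf : List Int) : List (Int × Int) :=
  match cf with
  | [] => []
  | c0 :: rest => (rest.foldl pyConvStep ([(c0, 1)], 1, c0, 0, 1)).1

-- the scan-with-break loop of best_rational_approx
def pyBraLoop (l : List (Int × Int)) (max_den : Int) (best : Option (Int × Int)) :
    Option (Int × Int) :=
  match l with
  | [] => best
  | (p, q) :: t => if q ≤ max_den then pyBraLoop t max_den (some (p, q)) else best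

-- best_rational_approx(phase_num, phase_den, max_den)
def pyBRA (phase_num phase_den max_den : Int) : Option (Int × Int) :=
  pyBraLoop (pyConvergents (pyCF phase_num phase_den)) max_den none

def reconstruct_order_candidates (samples : List (Int × Int)) (a : Int) (N : Int) (max_den : Option Int) : List Int :=
  if samples = [] then []
  else
    let maxd := match max_den with | none => N | some m => m
    let cands := samples.foldl (fun cands sd =>
      match pyBRA sd.1 sd.2 maxd with
      | none => cands
      | some (_, q) => if 1 < q then cands ++ [q] else cands) []
    (PySem.List.sorted (PySem.Set.ofList cands) (fun r => r) false).foldl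
      (fun uniq r => uniq ++ [r]) []

-- ===== PORT B =====
-- the fused while-loop of B: one Euclid step per iteration, running denominator only
def altQLoop (num den maxd q0 q1 : Int) (best : Option Int) : Option Int :=
  if h : den = 0 then best
  else
    let t := PySem.Int.floordiv num den
    let q2 := t * q1 + q0
    if maxd < q2 then best
    else altQLoop den (num - t * den) maxd q1 q2 (some q2)
termination_by den.natAbs
decreasing_by exact pvModAbsLt num den h

def reconstruct_order_candidates_alt (samples : List (Int × Int)) (a : Int) (N : Int) (max_den : Option Int) : List Int :=
  let maxd := max_den.getD N
  let qs : PySem.Set Int := samples.foldl (fun qs sd =>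
    match altQLoop sd.1 sd.2 maxd 1 0 none with
    | some q => if 1 < q then PySem.Set.add qs q else qs
    | none => qs) PySem.Set.empty
  PySem.List.sorted qs (fun r => r) false

-- ===== PRECONDITION & SPEC =====
def Spec_reconstruct_order_candidates (samples : List (Int × Int)) (a : Int) (N : Int) (max_den : Option Int) (out : List Int) : Prop := out = reconstruct_order_candidates_alt samples a N max_den
instance (samples : List (Int × Int)) (a : Int) (N : Int) (max_den : Option Int) (out : List Int) : Decidable (Spec_reconstruct_order_candidates samples a N max_den out) := by unfold Spec_reconstruct_order_candidates; infer_instance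

-- ===== CLAIM (what is proved, stated in full; the proofs are below) =====
def Claim_equal_reconstruct_order_candidates : Prop := ∀ (samples : List (Int × Int)) (a : Int) (N : Int) (max_den : Option Int), Dom_reconstruct_order_candidates samples a N max_den → Spec_reconstruct_order_candidates samples a N max_den (reconstruct_order_candidates samples a N max_den)

-- ===== LEMMAS AND PROOFS =====

-- convergents continued from an arbitrary state (proof-side recursive form of A's foldl)
def convFrom (cf : List Int) (p0 p1 q0 q1 : Int) : List (Int × Int) :=
  match cf with
  | [] => []
  | a :: t =>
    let p2 := a * p1 + p0
    let q2 := a * q1 + q0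
    (p2, q2) :: convFrom t p1 p2 q1 q2

theorem foldl_pyConvStep (rest : List Int) (conv : List (Int × Int)) (p0 p1 q0 q1 : Int) :
    (rest.foldl pyConvStep (conv, p0, p1, q0, q1)).1 = conv ++ convFrom rest p0 p1 q0 q1 := by
  induction rest generalizing conv p0 p1 q0 q1 with
  | nil => simp [convFrom]
  | cons a t ih => simp [List.foldl, pyConvStep, convFrom, ih]

theorem pyConvergents_eq_convFrom (cf : List Int) :
    pyConvergents cf = convFrom cf 0 1 1 0 := by
  cases cf with
  | nil => rfl
  | cons c0 rest =>
    simp [pyConvergents, foldl_pyConvStep, convFrom]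

-- the key fusion lemma: A's scan of the convergent list of the continued fraction
-- equals B's single Euclidean loop, denominator components only
theorem braLoop_eq_altQLoop (num den maxd p0 p1 q0 q1 : Int) (best : Option (Int × Int)) :
    Option.map Prod.snd (pyBraLoop (convFrom (pyCF num den) p0 p1 q0 q1) maxd best)
      = altQLoop num den maxd q0 q1 (Option.map Prod.snd best) := by
  rw [pyCF, altQLoop]
  by_cases h : den = 0
  · simp [h, convFrom, pyBraLoop]
  · simp only [h, dite_false]
    by_cases hq : PySem.Int.floordiv num den * q1 + q0 ≤ maxd
    · have ih := braLoop_eq_altQLoop den (num - PySem.Int.floordiv num den * den) maxd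
        p1 (PySem.Int.floordiv num den * p1 + p0) q1 (PySem.Int.floordiv num den * q1 + q0)
        (some (PySem.Int.floordiv num den * p1 + p0, PySem.Int.floordiv num den * q1 + q0))
      simp only [Option.map_some] at ih
      simp [convFrom, pyBraLoop, hq, not_lt.mpr hq, ih]
    · simp [convFrom, pyBraLoop, hq, lt_of_not_ge hq]
termination_by den.natAbs
decreasing_by exact pvModAbsLt num den h

theorem pyBRA_snd (s den maxd : Int) :
    Option.map Prod.snd (pyBRA s den maxd) = altQLoop s den maxd 1 0 none := by
  rw [pyBRA, pyConvergents_eq_convFrom]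
  exact braLoop_eq_altQLoop s den maxd 0 1 1 0 none

-- A's list-accumulating fold over the samples versus B's set-accumulating fold
theorem fold_cands_eq (maxd : Int) (samples : List (Int × Int)) (l : List Int) :
    samples.foldl (fun qs sd =>
        match altQLoop sd.1 sd.2 maxd 1 0 none with
        | some q => if 1 < q then PySem.Set.add qs q else qs
        | none => qs) (PySem.Set.ofList l)
      = PySem.Set.ofList (samples.foldl (fun cands sd =>
          match pyBRA sd.1 sd.2 maxd with
          | none => cands
          | some (_, q) => if 1 < q then cands ++ [q] else cands) l) := by
  induction samples generalizing l with
  | nil => rfl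
  | cons sd t ih =>
    simp only [List.foldl]
    have hs := pyBRA_snd sd.1 sd.2 maxd
    cases hA : pyBRA sd.1 sd.2 maxd with
    | none =>
      rw [hA] at hs
      simp only [Option.map_none] at hs
      rw [← hs]
      exact ih l
    | some pq =>
      obtain ⟨p, q⟩ := pq
      rw [hA] at hs
      simp only [Option.map_some] at hs
      rw [← hs]
      by_cases h1 : 1 < q
      · simp only [h1, if_true, ← PySem.Set.ofList_append_singleton]
        exact ih (l ++ [q])
      · simp only [h1, if_false]
        exact ih l

-- ===== VERDICT (by name: the statement is the Claim_ definition above) =====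
theorem reconstruct_order_candidates_spec : Claim_equal_reconstruct_order_candidates := by
  intro samples a N max_den _
  unfold Spec_reconstruct_order_candidates reconstruct_order_candidates reconstruct_order_candidates_alt
  by_cases hs : samples = []
  · subst hs; cases max_den <;> rfl
  · cases max_den with
    | none =>
      simp only [hs, if_false, Option.getD]
      rw [← fold_cands_eq N samples [], PySem.List.foldl_append_singleton]
      rfl
    | some m =>
      simp only [hs, if_false, Option.getD]
      rw [← fold_cands_eq m samples [], PySem.List.foldl_append_singleton]
      rfl
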